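-- pv_equiv track=rewrite | github.com/rsalesc/robox.io | robox/box/validators.py | _process_bounds
-- ===== SOURCE A (Python) =====
-- from typing import Dict, List, Optional, Set, Tuple
--
-- HitBounds = Dict[str, Tuple[bool, bool]]
--
-- def _bounds_or(lhs: Tuple[bool, bool], rhs: Tuple[bool, bool]) -> Tuple[bool, bool]:
--     return (lhs[0] or rhs[0], lhs[1] or rhs[1])
--
-- def _process_bounds(log: str) -> HitBounds:
--     bounds: HitBounds = {}
--     for line in log.splitlines():
--         items = line.split(':')
--         if len(items) != 2:
--             continue
--         k, v = items
--         k = k[1:-1]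
--         v = v.strip()
--
--         hit = ('min-value-hit' in v, 'max-value-hit' in v)
--         if k not in bounds:
--             bounds[k] = hit
--             continue
--         bounds[k] = _bounds_or(bounds[k], hit)
--     return bounds
-- ===== SOURCE B (Python) =====
-- from typing import Dict, Tuple
--
-- HitBounds = Dict[str, Tuple[bool, bool]]
--
-- def _process_bounds(log: str) -> HitBounds:
--     # Pass 1: group the stripped values of every well-formed line by its
--     # sliced key, in first-seen key order.
--     groups: Dict[str, list] = {}
--     for line in log.splitlines():
--         items = line.split(':')
--         if len(items) != 2:
--             continue
--         k, v = items
--         groups.setdefault(k[1:-1], []).append(v.strip())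
--     # Pass 2: reduce each group to its (min-hit, max-hit) flags.
--     return {k: (any('min-value-hit' in v for v in vs),
--                 any('max-value-hit' in v for v in vs))
--             for k, vs in groups.items()}
-- ===== Notes on version B (the rewrite author's own statement) =====
-- stated objective: alternative
-- what changed: Replaces A's online per-line OR-merge into the result dict by a two-phase shape: one pass grouping stripped values into a dict of lists keyed by the sliced key, then a reduction pass computing each key's flags with any() over its group.
import Mathlib
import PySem

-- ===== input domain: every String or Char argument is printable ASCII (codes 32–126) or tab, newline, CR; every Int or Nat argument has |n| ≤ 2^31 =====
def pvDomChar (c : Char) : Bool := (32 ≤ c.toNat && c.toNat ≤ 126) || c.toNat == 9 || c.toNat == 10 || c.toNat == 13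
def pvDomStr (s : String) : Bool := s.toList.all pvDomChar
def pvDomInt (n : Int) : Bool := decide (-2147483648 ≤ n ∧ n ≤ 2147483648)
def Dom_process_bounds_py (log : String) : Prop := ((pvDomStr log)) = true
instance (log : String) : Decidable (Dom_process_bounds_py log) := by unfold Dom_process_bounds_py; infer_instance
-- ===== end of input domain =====

-- B replaces A's online per-key OR-merge by a two-phase shape (group stripped
-- values per key, then reduce each group with any); same cost, alternative decomposition.

-- ===== PORT A =====
-- _bounds_or
def pvBoundsOr (lhs rhs : Bool × Bool) : Bool × Bool := (lhs.1 || rhs.1, lhs.2 || rhs.2)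

-- body of A's for-loop over log.splitlines()
def pvStepA (bounds : PySem.Dict String (Bool × Bool)) (line : String) :
    PySem.Dict String (Bool × Bool) :=
  match PySem.Str.split? line ":" with
  | some [k0, v0] =>
    let k := PySem.Str.slice k0 (some 1) (some (-1))
    let v := PySem.Str.strip v0
    let hit := (PySem.Str.isIn "min-value-hit" v, PySem.Str.isIn "max-value-hit" v)
    -- 'if k not in bounds' / 'bounds[k]' rendered through one get? lookup
    match bounds.get? k with
    | none => bounds.insert k hit
    | some old => bounds.insert k (pvBoundsOr old hit)
  | _ => bounds          -- len(items) != 2: continue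

def process_bounds_py (log : String) : List (String × Bool × Bool) :=
  ((PySem.Str.splitlines log).foldl pvStepA PySem.Dict.empty).items

-- ===== PORT B =====
-- body of B's grouping pass: groups.setdefault(k[1:-1], []).append(v.strip())
def pvStepB (g : PySem.Dict String (List String)) (line : String) :
    PySem.Dict String (List String) :=
  match PySem.Str.split? line ":" with
  | some [k0, v0] =>
      g.modify (PySem.Str.slice k0 (some 1) (some (-1))) [] (· ++ [PySem.Str.strip v0])
  | _ => g

-- the flag pair of B's final dict comprehension
def pvRedVal (vs : List String) : Bool × Bool :=
  (vs.any (fun v => PySem.Str.isIn "min-value-hit" v),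
   vs.any (fun v => PySem.Str.isIn "max-value-hit" v))

-- one entry of B's final dict comprehension
def pvRed (p : String × List String) : String × Bool × Bool := (p.1, pvRedVal p.2)

def process_bounds_py_alt (log : String) : List (String × Bool × Bool) :=
  let groups := (PySem.Str.splitlines log).foldl pvStepB PySem.Dict.empty
  groups.items.map pvRed

-- ===== PRECONDITION & SPEC =====
def Spec_process_bounds_py (log : String) (out : List (String × Bool × Bool)) : Prop := out = process_bounds_py_alt log
instance (log : String) (out : List (String × Bool × Bool)) : Decidable (Spec_process_bounds_py log out) := by unfold Spec_process_bounds_py; infer_instance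

-- ===== CLAIM (what is proved, stated in full; the proofs are below) =====
def Claim_equal_process_bounds_py : Prop := ∀ (log : String), Dom_process_bounds_py log → Spec_process_bounds_py log (process_bounds_py log)

-- ===== LEMMAS AND PROOFS =====

-- lookup in the per-key-reduced dict is the reduced lookup
lemma get?_mk_map_pvRed (l : List (String × List String)) (k : String) :
    (PySem.Dict.mk (l.map pvRed)).get? k = ((PySem.Dict.mk l).get? k).map pvRedVal := by
  induction l with
  | nil => rfl
  | cons p t ih =>
    obtain ⟨pk, pv⟩ := p
    simp only [List.map_cons, PySem.Dict.get?_mk_cons, pvRed]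
    by_cases h : pk = k
    · subst h; simp
    · simp [h, ih]

-- appending one value to a group ORs its flags in
lemma pvRedVal_append (vs : List String) (v : String) :
    pvRedVal (vs ++ [v]) = pvBoundsOr (pvRedVal vs)
      (PySem.Str.isIn "min-value-hit" v, PySem.Str.isIn "max-value-hit" v) := by
  simp [pvRedVal, pvBoundsOr]

-- one well-formed line: A's update of the reduced dict = reduction of B's grouping update
lemma step_core (g : PySem.Dict String (List String)) (k v : String) :
    (match (PySem.Dict.mk (g.items.map pvRed)).get? k with
     | none => (PySem.Dict.mk (g.items.map pvRed)).insert k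
         (PySem.Str.isIn "min-value-hit" v, PySem.Str.isIn "max-value-hit" v)
     | some old => (PySem.Dict.mk (g.items.map pvRed)).insert k
         (pvBoundsOr old (PySem.Str.isIn "min-value-hit" v, PySem.Str.isIn "max-value-hit" v)))
      = PySem.Dict.mk ((g.modify k [] (· ++ [v])).items.map pvRed) := by
  have hgmk : PySem.Dict.mk g.items = g := rfl
  have hget : (PySem.Dict.mk (g.items.map pvRed)).get? k = (g.get? k).map pvRedVal := by
    rw [get?_mk_map_pvRed, hgmk]
  cases hgk : g.get? k with
  | none =>
    have hc : g.contains k = false := by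
      rw [PySem.Dict.contains_eq_isSome_get?, hgk]; rfl
    have hcA : (PySem.Dict.mk (g.items.map pvRed)).contains k = false := by
      rw [PySem.Dict.contains_eq_isSome_get?, hget, hgk]; rfl
    rw [hgk] at hget
    rw [hget]
    simp only [Option.map_none]
    apply PySem.Dict.ext
    rw [PySem.Dict.items_insert_of_not_contains _ _ hcA]
    simp only [PySem.Dict.modify, PySem.Dict.getD_of_not_contains g _ hc, List.nil_append]
    rw [PySem.Dict.items_insert_of_not_contains _ _ hc]
    simp [pvRed, pvRedVal]
  | some vs =>
    have hc : g.contains k = true := by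
      rw [PySem.Dict.contains_eq_isSome_get?, hgk]; rfl
    have hcA : (PySem.Dict.mk (g.items.map pvRed)).contains k = true := by
      rw [PySem.Dict.contains_eq_isSome_get?, hget, hgk]; rfl
    have hgd : g.getD k [] = vs := by
      rw [PySem.Dict.getD_eq_get?_getD, hgk]; rfl
    rw [hgk] at hget
    rw [hget]
    simp only [Option.map_some]
    apply PySem.Dict.ext
    rw [PySem.Dict.items_insert_of_contains _ _ hcA]
    simp only [PySem.Dict.modify, hgd]
    rw [PySem.Dict.items_insert_of_contains _ _ hc]
    simp only [List.map_map]
    apply List.map_congr_left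
    intro p _
    obtain ⟨pk, pv⟩ := p
    by_cases hpk : pk = k
    · subst hpk
      simp [pvRed, Function.comp, pvRedVal_append]
    · simp [pvRed, Function.comp, hpk]

-- one line keeps A's dict equal to the reduction of B's groups
lemma step_rel (g : PySem.Dict String (List String)) (line : String) :
    pvStepA (PySem.Dict.mk (g.items.map pvRed)) line
      = PySem.Dict.mk ((pvStepB g line).items.map pvRed) := by
  unfold pvStepA pvStepB
  cases hsp : PySem.Str.split? line ":" with
  | none => rfl
  | some parts =>
    match parts with
    | [] => rfl
    | [_] => rfl
    | (_ :: _ :: _ :: _) => rfl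
    | [k0, v0] =>
      simp only
      exact step_core g (PySem.Str.slice k0 (some 1) (some (-1))) (PySem.Str.strip v0)

-- the whole fold preserves the relation
lemma fold_rel (lines : List String) (g : PySem.Dict String (List String)) :
    lines.foldl pvStepA (PySem.Dict.mk (g.items.map pvRed))
      = PySem.Dict.mk ((lines.foldl pvStepB g).items.map pvRed) := by
  induction lines generalizing g with
  | nil => rfl
  | cons line rest ih =>
    simp only [List.foldl_cons, step_rel g line]
    exact ih (pvStepB g line)

-- ===== VERDICT (by name: the statement is the Claim_ definition above) =====
theorem process_bounds_py_spec : Claim_equal_process_bounds_py := by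
  intro log _
  unfold Spec_process_bounds_py process_bounds_py process_bounds_py_alt
  have h := fold_rel (PySem.Str.splitlines log) PySem.Dict.empty
  have he : (PySem.Dict.mk (((PySem.Dict.empty : PySem.Dict String (List String))).items.map pvRed))
      = (PySem.Dict.empty : PySem.Dict String (Bool × Bool)) := rfl
  rw [he] at h
  rw [h]
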